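-- pv_equiv track=rewrite | github.com/JulianDevSys/progammingchallenges | practicando.py | numeros_pares
-- ===== SOURCE A (Python) =====
-- def numeros_pares(numero):
--     total_datos= []
--     for i in range(1, numero+1):
--         if i%2==1:
--             continue
--         else :
--             lista_numeros= (i)
--             total_datos.append(lista_numeros)
--     return total_datos
-- ===== SOURCE B (Python) =====
-- def numeros_pares(numero):
--     # Walk down from the largest even <= numero to 2, then reverse.
--     resultado = []
--     k = numero if numero % 2 == 0 else numero - 1
--     while k >= 2:
--         resultado.append(k)
--         k -= 2
--     resultado.reverse()
--     return resultado
-- ===== Notes on version B (the rewrite author's own statement) =====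
-- stated objective: alternative
-- what changed: Instead of scanning 1..numero upwards and filtering out odd values with a modulo test, B starts at the largest even number <= numero, walks DOWN in steps of 2 collecting values, and reverses the accumulator at the end.
import Mathlib
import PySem

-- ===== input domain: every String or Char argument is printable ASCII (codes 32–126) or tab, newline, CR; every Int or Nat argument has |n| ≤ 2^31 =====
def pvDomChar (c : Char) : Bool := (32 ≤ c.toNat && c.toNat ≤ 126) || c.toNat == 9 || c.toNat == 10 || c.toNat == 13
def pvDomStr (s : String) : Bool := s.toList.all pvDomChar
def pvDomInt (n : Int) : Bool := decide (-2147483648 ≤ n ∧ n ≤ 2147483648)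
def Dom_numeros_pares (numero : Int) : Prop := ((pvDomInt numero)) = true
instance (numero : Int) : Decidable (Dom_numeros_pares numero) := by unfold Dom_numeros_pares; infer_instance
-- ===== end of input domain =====

-- B replaces A's upward filter-by-modulo scan with a downward walk from the largest even ≤ numero in steps of 2, reversed at the end (alternative decomposition, same cost).

-- ===== PORT A =====
def numeros_pares (numero : Int) : List Int :=
  (PySem.List.pyRange 1 (numero + 1) 1).foldl
    (fun total_datos i =>
      if PySem.Int.mod i 2 == 1 then total_datos else total_datos ++ [i]) []

-- ===== PORT B =====
-- the 'while k >= 2: append k; k -= 2' loop of Source B, as structural recursion on k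
def pvEvensDown (k : Int) : List Int :=
  if h : 2 ≤ k then k :: pvEvensDown (k - 2) else []
termination_by k.toNat
decreasing_by omega

def numeros_pares_alt (numero : Int) : List Int :=
  (pvEvensDown (if PySem.Int.mod numero 2 == 0 then numero else numero - 1)).reverse

-- ===== PRECONDITION & SPEC =====
def Spec_numeros_pares (numero : Int) (out : List Int) : Prop := out = numeros_pares_alt numero
instance (numero : Int) (out : List Int) : Decidable (Spec_numeros_pares numero out) := by unfold Spec_numeros_pares; infer_instance

-- ===== CLAIM (what is proved, stated in full; the proofs are below) =====
def Claim_equal_numeros_pares : Prop := ∀ (numero : Int), Dom_numeros_pares numero → Spec_numeros_pares numero (numeros_pares numero)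

-- ===== LEMMAS AND PROOFS =====

-- closed form both sides are compared against: the evens 2,4,…,2*(numero//2)
def pvEvensClosed (numero : Int) : List Int :=
  (PySem.List.pyRange 1 (PySem.Int.floordiv numero 2 + 1) 1).map (fun i => 2 * i)

lemma numeros_pares_key (m : Nat) : numeros_pares (m : Int) = pvEvensClosed (m : Int) := by
  induction m with
  | zero => decide
  | succ m ih =>
    unfold numeros_pares pvEvensClosed at *
    have em : ∀ a : Int, PySem.Int.mod a 2 = a % 2 := fun a =>
      PySem.Int.mod_eq_emod_of_pos (by omega)
    have ef : ∀ a : Int, PySem.Int.floordiv a 2 = a / 2 := fun a =>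
      PySem.Int.floordiv_eq_ediv_of_pos (by omega)
    simp only [em, ef] at ih ⊢
    have hc : ((m + 1 : Nat) : Int) = (m : Int) + 1 := by push_cast; ring
    rw [hc, PySem.List.pyRange_one_succ_right (by omega : (1:Int) ≤ (m:Int) + 1),
        List.foldl_append, List.foldl_cons, List.foldl_nil]
    rcases Int.even_or_odd (m : Int) with he | ho
    · obtain ⟨k, hk⟩ := he
      have h1 : ((m:Int) + 1) % 2 = 1 := by omega
      have hfd : ((m:Int) + 1) / 2 = (m:Int) / 2 := by omega
      rw [h1, hfd, ← ih]
      simp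
    · obtain ⟨k, hk⟩ := ho
      have h0 : ((m:Int) + 1) % 2 = 0 := by omega
      have hfd : ((m:Int) + 1) / 2 = (m:Int) / 2 + 1 := by omega
      have hval : (m:Int) / 2 = k := by omega
      rw [h0, hfd, PySem.List.pyRange_one_succ_right
            (by omega : (1:Int) ≤ (m:Int) / 2 + 1),
          List.map_append, ← ih, hval]
      simp
      omega

lemma pvEvensDown_double (j : Nat) :
    (pvEvensDown (2 * (j : Int))).reverse =
      (PySem.List.pyRange 1 ((j : Int) + 1) 1).map (fun i => 2 * i) := by
  induction j with
  | zero =>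
    rw [pvEvensDown, dif_neg (by norm_num)]
    rw [PySem.List.pyRange_one_eq_nil (by norm_num : ((0:Nat):Int) + 1 ≤ 1)]
    rfl
  | succ j ih =>
    rw [pvEvensDown]
    have hc : (((j + 1 : Nat)) : Int) = (j : Int) + 1 := by push_cast; ring
    rw [hc]
    rw [dif_pos (by omega : (2:Int) ≤ 2 * ((j : Int) + 1))]
    have h2 : 2 * ((j : Int) + 1) - 2 = 2 * (j : Int) := by ring
    rw [h2, List.reverse_cons, ih,
        PySem.List.pyRange_one_succ_right (by omega : (1:Int) ≤ (j:Int) + 1),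
        List.map_append]
    simp

lemma numeros_pares_alt_eq_closed (numero : Int) :
    numeros_pares_alt numero = pvEvensClosed numero := by
  unfold numeros_pares_alt pvEvensClosed
  have em : PySem.Int.mod numero 2 = numero % 2 :=
    PySem.Int.mod_eq_emod_of_pos (by omega)
  have ef : PySem.Int.floordiv numero 2 = numero / 2 :=
    PySem.Int.floordiv_eq_ediv_of_pos (by omega)
  rw [em, ef]
  rcases le_or_gt 0 numero with h | h
  · -- numero ≥ 0: top even is 2*(numero/2)
    have hq : 0 ≤ numero / 2 := by positivity
    obtain ⟨j, hj⟩ := Int.eq_ofNat_of_zero_le hq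
    rcases Int.even_or_odd numero with he | ho
    · obtain ⟨k, hk⟩ := he
      have h0 : numero % 2 = 0 := by omega
      rw [h0, if_pos (by decide : (((0:Int) == 0) = true)), hj,
          show numero = 2 * (j : Int) by omega]
      exact pvEvensDown_double j
    · obtain ⟨k, hk⟩ := ho
      have h1 : numero % 2 = 1 := by omega
      rw [h1, if_neg (by decide : ¬ (((1:Int) == 0) = true)), hj,
          show numero - 1 = 2 * (j : Int) by omega]
      exact pvEvensDown_double j
  · -- numero < 0: both sides empty
    have ht : ∀ t : Int, t < 2 → pvEvensDown t = [] := by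
      intro t h2
      rw [pvEvensDown, dif_neg (by omega)]
    have hr : PySem.List.pyRange 1 (numero / 2 + 1) 1 = [] :=
      PySem.List.pyRange_one_eq_nil (by omega)
    rcases Int.even_or_odd numero with he | ho
    · obtain ⟨k, hk⟩ := he
      have h0 : numero % 2 = 0 := by omega
      rw [h0, if_pos (by decide : (((0:Int) == 0) = true)), ht numero (by omega), hr]
      rfl
    · obtain ⟨k, hk⟩ := ho
      have h1 : numero % 2 = 1 := by omega
      rw [h1, if_neg (by decide : ¬ (((1:Int) == 0) = true)), ht (numero - 1) (by omega), hr]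
      rfl

lemma numeros_pares_neg (numero : Int) (h : numero < 0) :
    numeros_pares numero = pvEvensClosed numero := by
  unfold numeros_pares pvEvensClosed
  have h1 : PySem.List.pyRange 1 (numero + 1) 1 = [] :=
    PySem.List.pyRange_one_eq_nil (by omega)
  have h2 : PySem.Int.floordiv numero 2 < 1 := by
    rw [PySem.Int.floordiv_lt_iff_lt_mul (by omega)]; omega
  have h3 : PySem.List.pyRange 1 (PySem.Int.floordiv numero 2 + 1) 1 = [] :=
    PySem.List.pyRange_one_eq_nil (by omega)
  rw [h1, h3]
  rfl

-- ===== VERDICT (by name: the statement is the Claim_ definition above) =====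
theorem numeros_pares_spec : Claim_equal_numeros_pares := by
  intro numero _
  unfold Spec_numeros_pares
  rw [numeros_pares_alt_eq_closed]
  rcases le_or_gt 0 numero with h | h
  · obtain ⟨m, rfl⟩ := Int.eq_ofNat_of_zero_le h
    exact numeros_pares_key m
  · exact numeros_pares_neg numero h
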